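-- pv_equiv track=rewrite | github.com/YYuJeong/StudyLog | Programmers_Lv1/programmers_lv1_92334.py | solution
-- ===== SOURCE A (Python) =====
-- def solution(id_list, report, k):
--     answer = []
--     dic = {id: {"reported_me": set(), "mail": 0} for id in id_list}
--     for rep in report:
--         reporter, reported = rep.split()
--
--         dic[reported]["reported_me"].add(reporter)
--
--     for key in dic:
--         if len(dic[key]["reported_me"]) >= k:
--             for user in dic[key]["reported_me"]:
--                 dic[user]["mail"] += 1
--
--     mails = [value["mail"] for value in dic.values()]
--     return mails
-- ===== SOURCE B (Python) =====
-- def solution(id_list, report, k):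
--     pairs = [tuple(r.split()) for r in report]
--     rep_sets = [{a for (a, b) in pairs if b == y} for y in id_list]
--     return [sum(1 for s in rep_sets if len(s) >= k and x in s) for x in id_list]
-- ===== Notes on version B (the rewrite author's own statement) =====
-- stated objective: simpler
-- what changed: A builds a mutable dict of per-id records {reporter-set, mail} and propagates mail by a second dict-mutating loop over keys and set members; B instead computes one list of distinct-reporter sets aligned with id_list and returns each id's mail as a direct count of the sufficiently-reported users it reported, with no dict and no mutation.
-- outside the precondition, e.g. on solution(['a', 'a', 'b'], ['a b'], 1): A returns [1, 0], B returns [1, 1, 0]; on solution(['a'], ['b a'], 2): A returns [0], B returns [0]; on solution(['a'], ['b a'], 1): A raises KeyError, B returns [0]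
import Mathlib
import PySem

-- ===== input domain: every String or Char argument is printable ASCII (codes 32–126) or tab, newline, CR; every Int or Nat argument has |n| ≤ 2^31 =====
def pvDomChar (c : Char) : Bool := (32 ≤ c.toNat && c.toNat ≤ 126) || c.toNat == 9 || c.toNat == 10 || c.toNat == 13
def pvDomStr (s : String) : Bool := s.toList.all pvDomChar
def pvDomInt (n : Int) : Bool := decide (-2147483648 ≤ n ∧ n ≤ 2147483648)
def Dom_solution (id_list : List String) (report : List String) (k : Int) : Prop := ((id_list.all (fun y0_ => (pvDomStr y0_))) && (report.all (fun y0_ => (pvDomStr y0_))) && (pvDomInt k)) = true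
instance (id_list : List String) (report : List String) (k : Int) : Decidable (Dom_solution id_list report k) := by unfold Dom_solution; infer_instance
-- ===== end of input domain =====

-- B replaces A's mutable dict of {reporter-set, mail} records with a flat pass: one list of
-- distinct-reporter sets aligned with id_list, then each id's mail is a direct count of the
-- sufficiently-reported users it reported (objective: simpler; no speed claim).

-- ===== PORT A =====
def solution (id_list : List String) (report : List String) (k : Int) : List Int :=
  let dic : PySem.Dict String (PySem.Set String × Int) :=
    id_list.foldl (fun d id => d.insert id ((PySem.Set.empty : PySem.Set String), (0 : Int))) PySem.Dict.empty
  let dic := report.foldl (fun d rep =>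
      let reporter := (PySem.Str.split₀ rep).getD 0 ""
      let reported := (PySem.Str.split₀ rep).getD 1 ""
      d.modify reported (PySem.Set.empty, 0) (fun v => (v.1.add reporter, v.2))) dic
  let dic := dic.keys.foldl (fun d key =>
      let v := d.getD key (PySem.Set.empty, 0)
      if k ≤ PySem.Set.len v.1 then
        v.1.foldl (fun d user => d.modify user (PySem.Set.empty, 0) (fun w => (w.1, w.2 + 1))) d
      else d) dic
  dic.values.map (·.2)

-- ===== PORT B =====
def solution_alt (id_list : List String) (report : List String) (k : Int) : List Int :=
  let pairs := report.map (fun r => ((PySem.Str.split₀ r).getD 0 "", (PySem.Str.split₀ r).getD 1 ""))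
  let repSets := id_list.map (fun y => PySem.Set.ofList ((pairs.filter (fun ab => ab.2 == y)).map (·.1)))
  id_list.map (fun x =>
    ((repSets.filter (fun s => decide (k ≤ PySem.Set.len s) && PySem.Set.contains s x)).length : Int))

-- ===== PRECONDITION & SPEC =====
-- Pre_ excludes duplicate ids in id_list (A's dict collapses them, so A's output length is the
-- number of DISTINCT ids — an accidental corner on which no behaviour is canonical) and reports
-- whose tokens are not exactly two members of id_list: on an unknown reported id A raises
-- KeyError, and an unknown reporter makes A raise KeyError as soon as that reporter's target
-- collects k distinct reports, so Pre_ conservatively requires every token to be a known id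
-- (on an unknown reporter whose target stays below k, A still returns and B agrees — see cites).
def Pre_solution (id_list : List String) (report : List String) (k : Int) : Prop :=
  id_list.Nodup ∧
    ∀ r ∈ report, (PySem.Str.split₀ r).length = 2 ∧ ∀ t ∈ PySem.Str.split₀ r, t ∈ id_list
instance (id_list : List String) (report : List String) (k : Int) : Decidable (Pre_solution id_list report k) := by unfold Pre_solution; infer_instance

def pvWitness_solution : List String × List String × Int := (["muzi", "frodo"], ["muzi frodo"], 1)

def Spec_solution (id_list : List String) (report : List String) (k : Int) (out : List Int) : Prop := out = solution_alt id_list report k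
instance (id_list : List String) (report : List String) (k : Int) (out : List Int) : Decidable (Spec_solution id_list report k out) := by unfold Spec_solution; infer_instance

-- ===== CLAIM (what is proved, stated in full; the proofs are below) =====
def Claim_equal_solution : Prop := ∀ (id_list : List String) (report : List String) (k : Int), Dom_solution id_list report k → Pre_solution id_list report k → Spec_solution id_list report k (solution id_list report k)

-- ===== LEMMAS AND PROOFS =====

-- default record value threaded through A's dict (defeq to A's literal (set(), 0))
def pvD0 : PySem.Set String × Int := ((PySem.Set.empty : PySem.Set String), (0 : Int))

lemma pv_keys_modify_loop {β : Type} (key : β → String) (f : β → PySem.Set String × Int → PySem.Set String × Int) :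
    ∀ (l : List β) (d : PySem.Dict String (PySem.Set String × Int)),
      (∀ b ∈ l, key b ∈ d.keys) →
      (l.foldl (fun d b => d.modify (key b) pvD0 (f b)) d).keys = d.keys := by
  intro l
  induction l with
  | nil => intro d _; rfl
  | cons b l ih =>
    intro d h
    have hc : d.contains (key b) = true := (PySem.Dict.contains_iff_mem_keys d (key b)).2 (h b (by simp))
    have hk : (d.modify (key b) pvD0 (f b)).keys = d.keys := by
      rw [PySem.Dict.keys_modify, PySem.Dict.keys_insert_of_contains _ _ hc]
    rw [List.foldl_cons, ih _ (by intro c hc'; rw [hk]; exact h c (by simp [hc'])), hk]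

lemma pv_stage0 (id_list : List String) (h : id_list.Nodup) :
    (id_list.foldl (fun d id => d.insert id pvD0) PySem.Dict.empty).items
      = id_list.map (fun y => (y, pvD0)) := by
  have := PySem.Dict.items_foldl_insert_fresh id_list (fun y => y) (fun _ => pvD0)
      (PySem.Dict.empty) (by intro a _; exact PySem.Dict.contains_empty a) (by simpa using h)
  simpa using this

lemma pv_inner (us : List String) :
    ∀ (d : PySem.Dict String (PySem.Set String × Int)) (y : String),
      (us.foldl (fun d user => d.modify user pvD0 (fun w => (w.1, w.2 + 1))) d).getD y pvD0
        = ((d.getD y pvD0).1, (d.getD y pvD0).2 + (us.count y : Int)) := by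
  induction us with
  | nil => intro d y; simp
  | cons u us ih =>
    intro d y
    rw [List.foldl_cons, ih]
    rw [PySem.Dict.getD_modify]
    by_cases hy : y = u
    · subst hy; simp [List.count_cons]; ring
    · simp [hy, List.count_cons, Ne.symm hy]
def pvRep2 (r : String) : String × String :=
  ((PySem.Str.split₀ r).getD 0 "", (PySem.Str.split₀ r).getD 1 "")

def pvS (report : List String) (y : String) : PySem.Set String :=
  PySem.Set.ofList (((report.map pvRep2).filter (fun p => p.2 == y)).map (·.1))

lemma pv_stage1 (rs : List String) :
    ∀ (d : PySem.Dict String (PySem.Set String × Int)) (y : String),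
      (rs.foldl (fun d rep => d.modify (pvRep2 rep).2 pvD0 (fun v => (v.1.add (pvRep2 rep).1, v.2))) d).getD y pvD0
        = ((((rs.map pvRep2).filter (fun p => p.2 == y)).map (·.1)).foldl PySem.Set.add (d.getD y pvD0).1,
           (d.getD y pvD0).2) := by
  induction rs with
  | nil => intro d y; simp
  | cons r rs ih =>
    intro d y
    rw [List.foldl_cons, ih, PySem.Dict.getD_modify]
    by_cases hy : y = (pvRep2 r).2
    · subst hy
      rw [if_pos rfl]
      simp [List.filter_cons]
    · rw [if_neg hy]
      have : ((pvRep2 r).2 == y) = false := by simp [Ne.symm hy]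
      simp [List.filter_cons, this]

lemma pv_stage2 (k : Int) (Sf : String → PySem.Set String) (hnd : ∀ z, (Sf z).Nodup)
    (ids : List String) (hsub : ∀ z, ∀ u ∈ Sf z, u ∈ ids) :
    ∀ (ks : List String) (d : PySem.Dict String (PySem.Set String × Int)),
      d.keys = ids → (∀ z, (d.getD z pvD0).1 = Sf z) →
      ((ks.foldl (fun d key =>
          if k ≤ PySem.Set.len (d.getD key pvD0).1 then
            (d.getD key pvD0).1.foldl (fun d user => d.modify user pvD0 (fun w => (w.1, w.2 + 1))) d
          else d) d).keys = ids ∧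
      ∀ (y : String),
      (ks.foldl (fun d key =>
          if k ≤ PySem.Set.len (d.getD key pvD0).1 then
            (d.getD key pvD0).1.foldl (fun d user => d.modify user pvD0 (fun w => (w.1, w.2 + 1))) d
          else d) d).getD y pvD0
        = (Sf y, (d.getD y pvD0).2 +
            (((ks.filter (fun key => decide (k ≤ PySem.Set.len (Sf key)) && PySem.Set.contains (Sf key) y)).length : Nat) : Int))) := by
  intro ks
  induction ks with
  | nil =>
    intro d hk h
    refine ⟨hk, fun y => ?_⟩
    rw [← h y]
    simp
  | cons key ks ih =>
    intro d hk h
    rw [List.foldl_cons]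
    by_cases hcond : k ≤ PySem.Set.len (d.getD key pvD0).1
    · rw [if_pos hcond]
      have hsub' : ∀ u ∈ (d.getD key pvD0).1, u ∈ d.keys := by
        intro u hu
        rw [hk]
        exact hsub key u (by rw [← h key] at *; exact hu)
      have hkeys' : ((d.getD key pvD0).1.foldl (fun d user => d.modify user pvD0 (fun w => (w.1, w.2 + 1))) d).keys = ids := by
        have hkm := pv_keys_modify_loop (fun u => u) (fun _ w => (w.1, w.2 + 1)) ((d.getD key pvD0).1) d hsub'
        rw [hk] at hkm
        exact hkm
      have h' : ∀ z, (((d.getD key pvD0).1.foldl (fun d user => d.modify user pvD0 (fun w => (w.1, w.2 + 1))) d).getD z pvD0).1 = Sf z := by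
        intro z; rw [pv_inner]; exact h z
      obtain ⟨hk2, hval⟩ := ih _ hkeys' h'
      refine ⟨hk2, fun y => ?_⟩
      rw [hval y, pv_inner, h key]
      have hcond' : k ≤ PySem.Set.len (Sf key) := by rw [← h key]; exact hcond
      have hck : decide (k ≤ PySem.Set.len (Sf key)) = true := decide_eq_true hcond'
      rw [List.filter_cons]
      by_cases hmem : y ∈ Sf key
      · have hc : PySem.Set.contains (Sf key) y = true := (PySem.Set.contains_iff _ y).2 hmem
        have hcount : (Sf key).count y = 1 := List.count_eq_one_of_mem (hnd key) hmem
        have hlen : k ≤ ((Sf key).length : Int) := by simpa [PySem.Set.len] using hcond'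
        simp [hck, hc, hcount, hmem, hlen]
        push_cast
        ring
      · have hc : PySem.Set.contains (Sf key) y = false :=
          Bool.eq_false_iff.mpr (fun ht => hmem ((PySem.Set.contains_iff _ y).1 ht))
        have hcount : (Sf key).count y = 0 := List.count_eq_zero.2 hmem
        simp [hck, hc, hcount, hmem]
    · rw [if_neg hcond]
      obtain ⟨hk2, hval⟩ := ih d hk h
      refine ⟨hk2, fun y => ?_⟩
      rw [hval y]
      have hck : decide (k ≤ PySem.Set.len (Sf key)) = false := by
        rw [← h key]; exact decide_eq_false hcond
      have hlenf : ¬ k ≤ ((Sf key).length : Int) := by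
        have hx := hcond
        rw [h key] at hx
        simpa [PySem.Set.len] using hx
      rw [List.filter_cons]
      simp [hck, hlenf]
lemma pv_main (id_list report : List String) (k : Int)
    (hnd : id_list.Nodup)
    (hrep : ∀ r ∈ report, (PySem.Str.split₀ r).length = 2 ∧ ∀ t ∈ PySem.Str.split₀ r, t ∈ id_list) :
    ((((report.foldl (fun d rep => d.modify (pvRep2 rep).2 pvD0 (fun v => (v.1.add (pvRep2 rep).1, v.2)))
          (id_list.foldl (fun d id => d.insert id pvD0) PySem.Dict.empty)).keys).foldl
        (fun d key =>
          if k ≤ PySem.Set.len (d.getD key pvD0).1 then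
            (d.getD key pvD0).1.foldl (fun d user => d.modify user pvD0 (fun w => (w.1, w.2 + 1))) d
          else d)
        (report.foldl (fun d rep => d.modify (pvRep2 rep).2 pvD0 (fun v => (v.1.add (pvRep2 rep).1, v.2)))
          (id_list.foldl (fun d id => d.insert id pvD0) PySem.Dict.empty))).values.map (·.2))
      = id_list.map (fun x =>
          (((id_list.map (pvS report)).filter
              (fun s => decide (k ≤ PySem.Set.len s) && PySem.Set.contains s x)).length : Int)) := by
  have htok : ∀ r ∈ report, (pvRep2 r).1 ∈ id_list ∧ (pvRep2 r).2 ∈ id_list := by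
    intro r hr
    obtain ⟨hl, hm⟩ := hrep r hr
    constructor
    · have h0 : (PySem.Str.split₀ r).getD 0 "" ∈ PySem.Str.split₀ r := by
        rw [List.getD_eq_getElem _ "" (by omega)]
        exact List.getElem_mem _
      exact hm _ h0
    · have h1 : (PySem.Str.split₀ r).getD 1 "" ∈ PySem.Str.split₀ r := by
        rw [List.getD_eq_getElem _ "" (by omega)]
        exact List.getElem_mem _
      exact hm _ h1
  set d0 := id_list.foldl (fun d id => d.insert id pvD0) PySem.Dict.empty with hd0
  set d1 := report.foldl (fun d rep => d.modify (pvRep2 rep).2 pvD0 (fun v => (v.1.add (pvRep2 rep).1, v.2))) d0 with hd1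
  have h0items : d0.items = id_list.map (fun y => (y, pvD0)) := pv_stage0 id_list hnd
  have hkeys0 : d0.keys = id_list := by
    show d0.items.map (·.1) = id_list
    rw [h0items]
    simp [Function.comp_def]
  have hget0 : ∀ y, d0.getD y pvD0 = pvD0 := by
    intro y
    by_cases hy : y ∈ id_list
    · exact PySem.Dict.getD_of_mem_items d0 (by rw [h0items]; exact List.mem_map.2 ⟨y, hy, rfl⟩)
        (by rw [hkeys0]; exact hnd) pvD0
    · refine PySem.Dict.getD_of_not_contains d0 pvD0 ?_
      exact Bool.eq_false_iff.mpr (fun ht => hy (hkeys0 ▸ ((PySem.Dict.contains_iff_mem_keys d0 y).1 ht)))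
  have hget1 : ∀ y, d1.getD y pvD0 = (pvS report y, 0) := by
    intro y
    rw [hd1, pv_stage1 report d0 y, hget0 y]
    rfl
  have hkeys1 : d1.keys = id_list := by
    have hkm := pv_keys_modify_loop (fun rep => (pvRep2 rep).2) (fun rep v => (v.1.add (pvRep2 rep).1, v.2))
      report d0 (by intro b hb; rw [hkeys0]; exact (htok b hb).2)
    rw [hkeys0] at hkm
    exact hkm
  have hsubS : ∀ z, ∀ u ∈ pvS report z, u ∈ id_list := by
    intro z u hu
    rw [pvS, PySem.Set.mem_ofList] at hu
    obtain ⟨p, hp, rfl⟩ := List.mem_map.1 hu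
    obtain ⟨hp1, hp2⟩ := List.mem_filter.1 hp
    obtain ⟨r, hr, rfl⟩ := List.mem_map.1 hp1
    exact (htok r hr).1
  rw [hkeys1]
  obtain ⟨hk2, hval⟩ := pv_stage2 k (pvS report) (fun z => PySem.Set.nodup_ofList _) id_list hsubS
    id_list d1 hkeys1 (fun z => by rw [hget1 z])
  rw [PySem.Dict.values_eq_map_keys _ (by rw [hk2]; exact hnd) pvD0, hk2, List.map_map]
  refine List.map_congr_left ?_
  intro y _
  simp only [Function.comp]
  rw [hval y, hget1 y]
  simp only [List.filter_map, List.length_map, Function.comp_def]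
  simp

-- ===== VERDICT (by name: the statement is the Claim_ definition above) =====
theorem solution_spec : Claim_equal_solution := by
  intro id_list report k _ hpre
  exact pv_main id_list report k hpre.1 hpre.2
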